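-- pv_equiv track=rewrite | github.com/juandarr/advent-of-code | 2024/day24/day24-2.py | increaseBinary
-- ===== SOURCE A (Python) =====
-- def increaseBinary(values, newValue, var):
--     complete = False
--     b = bin(newValue)
--     for idx in range(45):
--         if not complete:
--             if b[-idx-1]=='b':
--                 complete=True
--         if not complete:
--             values[var+(str(idx) if idx>=10 else '0'+str(idx))]=int(b[-idx-1])
--         else:
--             values[var+(str(idx) if idx>=10 else '0'+str(idx))]=0
--     return values
-- ===== SOURCE B (Python) =====
-- def increaseBinary(values, newValue, var):
--     m = abs(newValue)
--     for idx in range(45):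
--         values[var + f"{idx:02d}"] = (m >> idx) & 1
--     return values
-- ===== Notes on version B (the rewrite author's own statement) =====
-- stated objective: simpler
-- what changed: Replaces bin()-string scanning with a 'complete' sentinel and negative string indexing by direct bit extraction: each key gets (abs(newValue) >> idx) & 1, no string of digits is ever built or scanned.
import Mathlib
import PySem

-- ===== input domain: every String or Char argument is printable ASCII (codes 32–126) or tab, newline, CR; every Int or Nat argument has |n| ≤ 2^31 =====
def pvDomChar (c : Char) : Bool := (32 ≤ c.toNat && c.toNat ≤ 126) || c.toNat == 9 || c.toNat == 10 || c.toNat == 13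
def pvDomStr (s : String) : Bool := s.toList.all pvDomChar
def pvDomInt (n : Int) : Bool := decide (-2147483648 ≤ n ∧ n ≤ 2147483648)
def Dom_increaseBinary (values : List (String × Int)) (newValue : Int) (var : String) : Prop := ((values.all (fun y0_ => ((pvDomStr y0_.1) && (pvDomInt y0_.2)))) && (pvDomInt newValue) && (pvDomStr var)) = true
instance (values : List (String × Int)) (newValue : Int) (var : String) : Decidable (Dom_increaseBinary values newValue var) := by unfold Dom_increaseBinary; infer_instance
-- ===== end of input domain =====

-- B replaces A's bin()-string scanning and 'complete' sentinel by direct bit extraction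
-- ((abs(newValue) >> idx) & 1); objective: simpler. Both A and B mutate the dict `values`
-- in place in Python (the same mutation); the equivalence proved is about the return value.

-- ===== PORT A =====
-- hand port of Python's bin(): digits of m (MSB first), empty for 0
def pyBinDigits : Nat → List Char
  | 0 => []
  | (m+1) => pyBinDigits ((m+1)/2) ++ [if (m+1) % 2 = 1 then '1' else '0']
decreasing_by exact Nat.div_lt_self (Nat.succ_pos m) (by omega)

-- bin(n) as a list of chars: exact ('-' sign, '0b' prefix, '0' for zero, else MSB-first digits)
def pyBin (n : Int) : List Char :=
  (if n < 0 then ['-'] else []) ++ ['0', 'b'] ++ (if n = 0 then ['0'] else pyBinDigits n.natAbs)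

-- one iteration of A's loop body (state = (values, complete))
def aStep (b : List Char) (var : String) (st : PySem.Dict String Int × Bool) (idx : Int) :
    PySem.Dict String Int × Bool :=
  let complete := if st.2 = false then
      (if PySem.List.pyGet? b (-idx-1) = some 'b' then true else st.2)
    else st.2
  let key := var ++ (if idx ≥ 10 then PySem.Int.toStr idx else "0" ++ PySem.Int.toStr idx)
  if complete = false then
    -- int(b[-idx-1]); the `none` case is Python's IndexError, unreachable: 'b' is always
    -- found before the index leaves the string (proved below), the default 0 is never used
    (st.1.insert key (match PySem.List.pyGet? b (-idx-1) with
      | some c => (PySem.Int.ofChars? [c]).getD 0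
      | none => 0), complete)
  else (st.1.insert key 0, complete)

def increaseBinary (values : List (String × Int)) (newValue : Int) (var : String) : List (String × Int) :=
  (((PySem.List.pyRange 0 45 1).foldl (aStep (pyBin newValue) var)
    (PySem.Dict.mk values, false)).1).items

-- ===== PORT B =====
-- one iteration of B's loop body; f"{idx:02d}" for 0 ≤ idx < 100 is exactly this padding
def bStep (m : Nat) (var : String) (d : PySem.Dict String Int) (idx : Int) : PySem.Dict String Int :=
  d.insert (var ++ (if idx < 10 then "0" else "") ++ PySem.Int.toStr idx)
    (((m >>> idx.toNat) &&& 1 : Nat) : Int)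

def increaseBinary_alt (values : List (String × Int)) (newValue : Int) (var : String) : List (String × Int) :=
  ((PySem.List.pyRange 0 45 1).foldl (bStep newValue.natAbs var) (PySem.Dict.mk values)).items

-- ===== PRECONDITION & SPEC =====
def Spec_increaseBinary (values : List (String × Int)) (newValue : Int) (var : String) (out : List (String × Int)) : Prop := out = increaseBinary_alt values newValue var
instance (values : List (String × Int)) (newValue : Int) (var : String) (out : List (String × Int)) : Decidable (Spec_increaseBinary values newValue var out) := by unfold Spec_increaseBinary; infer_instance

-- ===== CLAIM (what is proved, stated in full; the proofs are below) =====
def Claim_equal_increaseBinary : Prop := ∀ (values : List (String × Int)) (newValue : Int) (var : String), Dom_increaseBinary values newValue var → Spec_increaseBinary values newValue var (increaseBinary values newValue var)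

-- ===== LEMMAS AND PROOFS =====

-- the digits of bin(n) read LSB-first
def lsbChars : Nat → List Char
  | 0 => []
  | (m+1) => (if (m+1) % 2 = 1 then '1' else '0') :: lsbChars ((m+1)/2)
decreasing_by exact Nat.div_lt_self (Nat.succ_pos m) (by omega)

lemma pyBinDigits_reverse (m : Nat) : (pyBinDigits m).reverse = lsbChars m := by
  induction m using Nat.strong_induction_on with
  | _ m ih =>
    match m with
    | 0 => simp [pyBinDigits, lsbChars]
    | (k+1) =>
      rw [pyBinDigits, lsbChars, List.reverse_append]
      simp [ih ((k+1)/2) (Nat.div_lt_self (Nat.succ_pos k) (by omega))]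

lemma lsb_get_lt (m : Nat) : ∀ idx, idx < (lsbChars m).length →
    (lsbChars m)[idx]? = some (if (m >>> idx) % 2 = 1 then '1' else '0') := by
  induction m using Nat.strong_induction_on with
  | _ m ih =>
    match m with
    | 0 => intro idx h; simp [lsbChars] at h
    | (k+1) =>
      intro idx h
      rw [lsbChars] at h ⊢
      cases idx with
      | zero => simp
      | succ j =>
        simp only [List.getElem?_cons_succ]
        rw [ih ((k+1)/2) (Nat.div_lt_self (Nat.succ_pos k) (by omega)) j (by simpa using h)]
        rw [Nat.shiftRight_succ_inside]

lemma lsb_shift_zero (m : Nat) : ∀ idx, (lsbChars m).length ≤ idx → m >>> idx = 0 := by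
  induction m using Nat.strong_induction_on with
  | _ m ih =>
    match m with
    | 0 => intro idx _; simp
    | (k+1) =>
      intro idx h
      rw [lsbChars] at h
      cases idx with
      | zero => simp at h
      | succ j =>
        have hz : ((k+1)/2) >>> j = 0 :=
          ih ((k+1)/2) (Nat.div_lt_self (Nat.succ_pos k) (by omega)) j (by simpa using h)
        rw [Nat.shiftRight_succ_inside, hz]

-- the LSB-first digit block of bin(n) (with '0' for n = 0)
def dsOf (n : Int) : List Char := if n = 0 then ['0'] else lsbChars n.natAbs

lemma ds_get_lt (n : Int) (idx : Nat) (h : idx < (dsOf n).length) :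
    (dsOf n)[idx]? = some (if (n.natAbs >>> idx) % 2 = 1 then '1' else '0') := by
  unfold dsOf at h ⊢
  by_cases hn : n = 0
  · simp only [if_pos hn] at h ⊢
    have h0 : idx = 0 := by simpa using h
    subst h0; simp [hn]
  · simp only [if_neg hn] at h ⊢; exact lsb_get_lt n.natAbs idx h

lemma ds_shift_zero (n : Int) (idx : Nat) (h : (dsOf n).length ≤ idx) :
    n.natAbs >>> idx = 0 := by
  unfold dsOf at h
  by_cases hn : n = 0
  · simp [hn]
  · simp only [if_neg hn] at h; exact lsb_shift_zero n.natAbs idx h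

lemma revB (n : Int) :
    (pyBin n).reverse = dsOf n ++ 'b' :: '0' :: (if n < 0 then ['-'] else []) := by
  unfold pyBin dsOf
  by_cases hn : n = 0
  · simp [hn]
  · by_cases hneg : n < 0 <;> simp [hn, hneg, pyBinDigits_reverse]

lemma getNeg (l : List Char) (j : Nat) (h : j < l.length) :
    PySem.List.pyGet? l (-(j:Int)-1) = l.reverse[j]? := by
  have : (-(j:Int)-1) = -((j+1 : Nat) : Int) := by push_cast; ring
  rw [this, PySem.List.pyGet?_neg_natCast l (j+1) (by omega) (by omega)]
  rw [List.getElem?_reverse h]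
  congr 1
  omega

lemma key_eq (j : Nat) (var : String) :
    (var ++ if 10 ≤ j then PySem.Int.toStr (j:Int) else "0" ++ PySem.Int.toStr (j:Int))
      = (var ++ if j < 10 then "0" else "") ++ PySem.Int.toStr (j:Int) := by
  by_cases h : j < 10
  · rw [if_neg (by omega), if_pos h, String.append_assoc]
  · rw [if_pos (by omega), if_neg h, String.append_empty]

lemma key_eq_int (j : Nat) (var : String) :
    (var ++ if (j:Int) ≥ 10 then PySem.Int.toStr (j:Int) else "0" ++ PySem.Int.toStr (j:Int))
      = (var ++ if (j:Int) < 10 then "0" else "") ++ PySem.Int.toStr (j:Int) := by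
  by_cases h : (j:Int) < 10
  · rw [if_neg (by omega), if_pos h, String.append_assoc]
  · rw [if_pos (by omega), if_neg h, String.append_empty]

lemma lenB (n : Int) : (pyBin n).length = (dsOf n).length + 2 + (if n < 0 then 1 else 0) := by
  have := congrArg List.length (revB n)
  simp at this
  by_cases hneg : n < 0 <;> simp [hneg] at this ⊢ <;> omega

lemma step_eq (n : Int) (var : String) (d : PySem.Dict String Int) (j : Nat) :
    aStep (pyBin n) var (d, decide ((dsOf n).length < j)) (j : Int)
      = (bStep n.natAbs var d (j : Int), decide ((dsOf n).length < j + 1)) := by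
  by_cases hj : (dsOf n).length < j
  · -- already complete: A writes 0; B's bit is 0 since all bits are past the digits
    have hz : n.natAbs >>> j = 0 := ds_shift_zero n j (by omega)
    simp only [aStep, bStep, decide_eq_true hj, decide_eq_true (show (dsOf n).length < j + 1 by omega)]
    simp [hz, Int.toNat_natCast]
    rw [key_eq]
  · -- not yet complete: the read is in range
    have hjle : j ≤ (dsOf n).length := by omega
    have hlen : j < (pyBin n).length := by rw [lenB n]; by_cases hneg : n < 0 <;> simp [hneg] <;> omega
    have hget : PySem.List.pyGet? (pyBin n) (-(j:Int)-1)
        = (dsOf n ++ 'b' :: '0' :: (if n < 0 then ['-'] else []))[j]? := by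
      rw [getNeg (pyBin n) j hlen, revB n]
    by_cases hjL : j = (dsOf n).length
    · -- hits the 'b': becomes complete, writes 0; B's bit is 0
      have hb : PySem.List.pyGet? (pyBin n) (-(j:Int)-1) = some 'b' := by
        rw [hget, hjL, List.getElem?_append_right (le_refl _)]
        simp
      have hz : n.natAbs >>> j = 0 := ds_shift_zero n j (by omega)
      simp only [aStep, bStep, decide_eq_false hj, decide_eq_true (show (dsOf n).length < j + 1 by omega)]
      simp [hb, hz, Int.toNat_natCast]
      rw [key_eq]
    · -- a digit: writes int(digit) = bit j
      have hjlt : j < (dsOf n).length := by omega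
      have hd : PySem.List.pyGet? (pyBin n) (-(j:Int)-1)
          = some (if (n.natAbs >>> j) % 2 = 1 then '1' else '0') := by
        rw [hget, List.getElem?_append_left hjlt, ds_get_lt n j hjlt]
      have hval : (PySem.Int.ofChars? [if (n.natAbs >>> j) % 2 = 1 then '1' else '0']).getD 0
          = (((n.natAbs >>> j) &&& 1 : Nat) : Int) := by
        rw [Nat.and_one_is_mod]
        rcases Nat.mod_two_eq_zero_or_one (n.natAbs >>> j) with h2 | h2 <;> rw [h2] <;> decide
      have hnotb : ¬ ((if (n.natAbs >>> j) % 2 = 1 then '1' else '0') = 'b') := by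
        by_cases h2 : (n.natAbs >>> j) % 2 = 1 <;> simp [h2]
      simp only [aStep, bStep, decide_eq_false hj,
        decide_eq_false (show ¬ ((dsOf n).length < j + 1) by omega), hd]
      simp only [Option.some.injEq, if_neg hnotb, reduceIte, Int.toNat_natCast, hval]
      rw [key_eq_int]

lemma loop_eq (n : Int) (var : String) :
    ∀ (k j : Nat) (d : PySem.Dict String Int),
      (((List.range' j k).map (fun i => Int.ofNat i)).foldl (aStep (pyBin n) var)
        (d, decide ((dsOf n).length < j))).1
      = ((List.range' j k).map (fun i => Int.ofNat i)).foldl (bStep n.natAbs var) d := by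
  intro k
  induction k with
  | zero => intro j d; rfl
  | succ k ih =>
    intro j d
    rw [List.range'_succ, List.map_cons, List.foldl_cons, List.foldl_cons]
    simp only [Int.ofNat_eq_natCast]
    rw [step_eq n var d j]
    exact ih (j+1) (bStep n.natAbs var d (j : Int))

lemma range45 : PySem.List.pyRange 0 45 1 = (List.range' 0 45).map (fun i => Int.ofNat i) := by
  decide

-- ===== VERDICT (by name: the statement is the Claim_ definition above) =====
theorem increaseBinary_spec : Claim_equal_increaseBinary := by
  intro values newValue var _
  unfold Spec_increaseBinary increaseBinary increaseBinary_alt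
  rw [range45]
  have h := loop_eq newValue var 45 0 (PySem.Dict.mk values)
  simpa using congrArg PySem.Dict.items h
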